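-- pv_equiv track=rewrite | github.com/childe/doudizhu | doudizhu.py | _find_three
-- ===== SOURCE A (Python) =====
-- def _find_three(cards, card, must_be_bigger):
--     for i, e in enumerate(cards[:-2]):
--         if (must_be_bigger is True and e <= card) \
--                 or (must_be_bigger is False and e < card):
--             continue
--         if cards[i:i+3] == [e] * 3:
--             return [e] * 3
--     return None
-- ===== SOURCE B (Python) =====
-- def _find_three(cards, card, must_be_bigger):
--     # Build maximal runs of equal consecutive cards, then test each run once.
--     runs = []
--     i = 0
--     n = len(cards)
--     while i < n:
--         j = i + 1
--         while j < n and cards[j] == cards[i]: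
--             j += 1
--         runs.append((cards[i], j - i))
--         i = j
--     for v, cnt in runs:
--         if (must_be_bigger is True and v <= card) \
--                 or (must_be_bigger is False and v < card):
--             continue
--         if cnt >= 3:
--             return [v] * 3
--     return None
-- ===== Notes on version B (the rewrite author's own statement) =====
-- stated objective: alternative
-- what changed: B groups the cards into maximal runs of equal consecutive values in one pass and returns the triple for the first run that passes the threshold test and has length >= 3, instead of A's comparison of an overlapping 3-element slice against [e]*3 at every index.
import Mathlib
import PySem

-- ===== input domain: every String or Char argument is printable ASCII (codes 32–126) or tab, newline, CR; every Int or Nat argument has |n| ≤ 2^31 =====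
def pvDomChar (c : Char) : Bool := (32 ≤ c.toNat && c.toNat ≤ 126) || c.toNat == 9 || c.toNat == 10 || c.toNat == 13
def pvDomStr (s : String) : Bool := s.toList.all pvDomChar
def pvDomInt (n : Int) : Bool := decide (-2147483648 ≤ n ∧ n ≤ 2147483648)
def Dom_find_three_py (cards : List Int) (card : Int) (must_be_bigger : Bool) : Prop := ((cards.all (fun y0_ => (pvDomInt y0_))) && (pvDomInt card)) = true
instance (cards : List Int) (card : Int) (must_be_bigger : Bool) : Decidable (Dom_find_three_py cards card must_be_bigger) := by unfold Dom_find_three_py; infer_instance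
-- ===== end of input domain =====

-- B replaces A's overlapping 3-window slice comparisons with a run-length grouping pass; objective: alternative (same cost, different algorithm).


-- ===== PORT A =====
-- for i, e in enumerate(cards[:-2]): ... (the enumerate index i is carried explicitly)
def find_three_go (cards : List Int) (card : Int) (mb : Bool) : Int → List Int → Option (List Int)
  | _, [] => none
  | i, e :: rest =>
    if (mb = true ∧ e ≤ card) ∨ (mb = false ∧ e < card) then
      find_three_go cards card mb (i + 1) rest
    else if PySem.List.slice cards (some i) (some (i + 3)) = [e, e, e] then some [e, e, e]
    else find_three_go cards card mb (i + 1) rest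

def find_three_py (cards : List Int) (card : Int) (must_be_bigger : Bool) : Option (List Int) :=
  find_three_go cards card must_be_bigger 0 (PySem.List.slice cards none (some (-2)))

-- ===== PORT B =====
-- runs building: the inner while advances j over equal cards; ported as takeWhile/dropWhile on the tail
def runs_go : List Int → List (Int × Int)
  | [] => []
  | x :: xs =>
    (x, ((xs.takeWhile (· == x)).length : Int) + 1) :: runs_go (xs.dropWhile (· == x))
termination_by l => l.length
decreasing_by
  simp only [List.length_cons]
  exact Nat.lt_succ_of_le (List.length_dropWhile_le _ _)

def scan_runs (card : Int) (mb : Bool) : List (Int × Int) → Option (List Int)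
  | [] => none
  | (v, cnt) :: rest =>
    if (mb = true ∧ v ≤ card) ∨ (mb = false ∧ v < card) then scan_runs card mb rest
    else if 3 ≤ cnt then some [v, v, v]
    else scan_runs card mb rest

def find_three_py_alt (cards : List Int) (card : Int) (must_be_bigger : Bool) : Option (List Int) :=
  scan_runs card must_be_bigger (runs_go cards)

-- ===== PRECONDITION & SPEC =====
def Spec_find_three_py (cards : List Int) (card : Int) (must_be_bigger : Bool) (out : Option (List Int)) : Prop := out = find_three_py_alt cards card must_be_bigger
instance (cards : List Int) (card : Int) (must_be_bigger : Bool) (out : Option (List Int)) : Decidable (Spec_find_three_py cards card must_be_bigger out) := by unfold Spec_find_three_py; infer_instance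

-- ===== CLAIM (what is proved, stated in full; the proofs are below) =====
def Claim_equal_find_three_py : Prop := ∀ (cards : List Int) (card : Int) (must_be_bigger : Bool), Dom_find_three_py cards card must_be_bigger → Spec_find_three_py cards card must_be_bigger (find_three_py cards card must_be_bigger)

-- ===== LEMMAS AND PROOFS =====

-- index shift: scanning with starting index i+1 over a cons'ed cards list
theorem go_shift (a : Int) (cards : List Int) (card : Int) (mb : Bool) :
    ∀ (l : List Int) (i : Int), 0 ≤ i →
      find_three_go (a :: cards) card mb (i + 1) l = find_three_go cards card mb i l := by
  intro l
  induction l with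
  | nil => intro i _; rfl
  | cons e rest ih =>
    intro i hi
    have hsl : PySem.List.slice (a :: cards) (some (i + 1)) (some (i + 1 + 3)) =
        PySem.List.slice cards (some i) (some (i + 3)) := by
      rw [PySem.List.slice_toNat _ (by omega) (by omega),
          PySem.List.slice_toNat _ (by omega) (by omega)]
      have h1 : (i + 1).toNat = i.toNat + 1 := by omega
      rw [h1, List.drop_succ_cons]
      have h2 : (i + 1 + 3).toNat - (i.toNat + 1) = (i + 3).toNat - i.toNat := by omega
      rw [h2]
    simp only [find_three_go, hsl]
    rw [ih (i + 1) (by omega)]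

theorem base_nil (card : Int) (mb : Bool) : find_three_py [] card mb = none := by
  simp [find_three_py, find_three_go, PySem.List.slice]

theorem base_one (a card : Int) (mb : Bool) : find_three_py [a] card mb = none := by
  rw [find_three_py, PySem.List.slice_to_neg_ofNat _ 2 (by omega)]
  simp [find_three_go]

theorem base_two (a b card : Int) (mb : Bool) : find_three_py [a, b] card mb = none := by
  rw [find_three_py, PySem.List.slice_to_neg_ofNat _ 2 (by omega)]
  simp [find_three_go]

theorem step_lemma (a b c card : Int) (rest : List Int) (mb : Bool) :
    find_three_py (a :: b :: c :: rest) card mb =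
      if (mb = true ∧ a ≤ card) ∨ (mb = false ∧ a < card) then
        find_three_py (b :: c :: rest) card mb
      else if b = a ∧ c = a then some [a, a, a]
      else find_three_py (b :: c :: rest) card mb := by
  have hsl : PySem.List.slice (a :: b :: c :: rest) none (some (-2)) =
      a :: PySem.List.slice (b :: c :: rest) none (some (-2)) := by
    rw [PySem.List.slice_to_neg_ofNat _ 2 (by omega), PySem.List.slice_to_neg_ofNat _ 2 (by omega)]
    have h1 : (a :: b :: c :: rest).length - 2 = ((b :: c :: rest).length - 2) + 1 := by
      simp
    rw [h1, List.take_succ_cons]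
  have h03 : PySem.List.slice (a :: b :: c :: rest) (some 0) (some (0 + 3)) = [a, b, c] := by
    rw [PySem.List.slice_toNat _ (by omega) (by omega)]
    rfl
  have hgo : find_three_go (a :: b :: c :: rest) card mb (0 + 1)
      (PySem.List.slice (b :: c :: rest) none (some (-2))) = find_three_py (b :: c :: rest) card mb := by
    rw [go_shift _ _ _ _ _ 0 (by omega), find_three_py]
  rw [find_three_py, hsl]
  simp only [find_three_go, h03, hgo]
  by_cases hp : (mb = true ∧ a ≤ card) ∨ (mb = false ∧ a < card)
  · simp [hp]
  · rw [if_neg hp, if_neg hp]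
    by_cases htr : b = a ∧ c = a
    · obtain ⟨hb, hc⟩ := htr
      subst hb; subst hc
      simp
    · have hls : ¬([a, b, c] = [a, a, a]) := fun h => htr (by
        simp only [List.cons.injEq, and_true, true_and] at h
        exact h)
      rw [if_neg hls, if_neg htr]

-- A's scan over a maximal run: it fires iff the run value passes and the run has length ≥ 3
theorem repl_lemma (card : Int) (mb : Bool) (v : Int) (rest : List Int)
    (hh : rest.head? ≠ some v) :
    ∀ (c : Nat),
      find_three_py (List.replicate c v ++ rest) card mb =
        if ¬((mb = true ∧ v ≤ card) ∨ (mb = false ∧ v < card)) ∧ 3 ≤ c then some [v, v, v]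
        else find_three_py rest card mb := by
  intro c
  induction c with
  | zero => simp
  | succ c ih =>
    match c, ih with
    | 0, _ =>
      cases rest with
      | nil =>
        rw [show List.replicate 1 v ++ ([] : List Int) = [v] from rfl, base_one, base_nil]
        simp
      | cons r1 t =>
        cases t with
        | nil =>
          rw [show List.replicate 1 v ++ [r1] = [v, r1] from rfl, base_two, base_one]
          simp
        | cons r2 t2 =>
          rw [show List.replicate 1 v ++ (r1 :: r2 :: t2) = v :: r1 :: r2 :: t2 from rfl,
            step_lemma]
          have hr1 : r1 ≠ v := fun h => hh (by simp [h])
          rw [if_neg (fun h : r1 = v ∧ r2 = v => hr1 h.1)]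
          by_cases hp : (mb = true ∧ v ≤ card) ∨ (mb = false ∧ v < card)
          · simp [hp]
          · simp [hp]
    | 1, ih =>
      cases rest with
      | nil =>
        rw [show List.replicate 2 v ++ ([] : List Int) = [v, v] from rfl, base_two, base_nil]
        simp
      | cons r1 t =>
        rw [show List.replicate 2 v ++ (r1 :: t) = v :: v :: r1 :: t from rfl, step_lemma]
        have hr1 : r1 ≠ v := fun h => hh (by simp [h])
        have hne : ¬(v = v ∧ r1 = v) := fun h => hr1 h.2
        rw [if_neg hne,
          show (v :: r1 :: t : List Int) = List.replicate 1 v ++ (r1 :: t) from rfl, ih]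
        by_cases hp : (mb = true ∧ v ≤ card) ∨ (mb = false ∧ v < card)
        · simp [hp]
        · simp [hp]
    | Nat.succ (Nat.succ k), ih =>
      have hexp : List.replicate (k + 2 + 1) v ++ rest =
          v :: v :: v :: (List.replicate k v ++ rest) := by
        simp [List.replicate_succ]
      rw [hexp, step_lemma]
      have hmid : find_three_py (v :: v :: (List.replicate k v ++ rest)) card mb =
          find_three_py (List.replicate (k + 2) v ++ rest) card mb := by
        simp [List.replicate_succ]
      by_cases hp : (mb = true ∧ v ≤ card) ∨ (mb = false ∧ v < card)
      · rw [if_pos hp, hmid, ih]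
        simp [hp]
      · rw [if_neg hp, if_pos ⟨rfl, rfl⟩, if_pos ⟨hp, by omega⟩]

theorem dropWhile_head_ne (x : Int) : ∀ (xs : List Int),
    (xs.dropWhile (· == x)).head? ≠ some x := by
  intro xs
  induction xs with
  | nil => simp
  | cons y ys ih =>
    by_cases h : (y == x) = true
    · simpa [List.dropWhile_cons, h] using ih
    · simp only [List.dropWhile_cons, h]
      simp only [Bool.false_eq_true, if_false]
      intro hc
      simp only [List.head?_cons, Option.some.injEq] at hc
      exact h (by simp [hc])

theorem main_lemma (card : Int) (mb : Bool) :
    ∀ (n : Nat) (cards : List Int), cards.length ≤ n →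
      find_three_py cards card mb = find_three_py_alt cards card mb := by
  intro n
  induction n with
  | zero =>
    intro cards hlen
    have : cards = [] := List.eq_nil_of_length_eq_zero (by omega)
    subst this
    simp [base_nil, find_three_py_alt, runs_go, scan_runs]
  | succ n ih =>
    intro cards hlen
    cases cards with
    | nil => simp [base_nil, find_three_py_alt, runs_go, scan_runs]
    | cons x xs =>
      have ht : xs.takeWhile (· == x) = List.replicate (xs.takeWhile (· == x)).length x := by
        apply List.eq_replicate_of_mem
        intro b hb
        have := List.mem_takeWhile_imp hb
        simpa using this
      have hsplit : x :: xs = List.replicate ((xs.takeWhile (· == x)).length + 1) x ++ xs.dropWhile (· == x) := by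
        conv_lhs => rw [show xs = xs.takeWhile (· == x) ++ xs.dropWhile (· == x) from (List.takeWhile_append_dropWhile).symm]
        rw [List.replicate_succ]
        simp only [List.cons_append, List.cons.injEq, true_and]
        rw [← ht]
      have hhead : (xs.dropWhile (· == x)).head? ≠ some x := dropWhile_head_ne x xs
      have hdl : (xs.dropWhile (· == x)).length ≤ n := by
        have := List.length_dropWhile_le (· == x) xs
        simp only [List.length_cons] at hlen
        omega
      rw [show find_three_py (x :: xs) card mb = find_three_py (List.replicate ((xs.takeWhile (· == x)).length + 1) x ++ xs.dropWhile (· == x)) card mb from by rw [← hsplit]]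
      rw [repl_lemma card mb x _ hhead]
      have halt : find_three_py_alt (x :: xs) card mb =
          if (mb = true ∧ x ≤ card) ∨ (mb = false ∧ x < card) then
            find_three_py_alt (xs.dropWhile (· == x)) card mb
          else if 3 ≤ ((xs.takeWhile (· == x)).length : Int) + 1 then some [x, x, x]
          else find_three_py_alt (xs.dropWhile (· == x)) card mb := by
        simp only [find_three_py_alt]
        rw [runs_go]
        simp only [scan_runs]
      rw [halt, ih _ hdl]
      by_cases hp : (mb = true ∧ x ≤ card) ∨ (mb = false ∧ x < card)
      · simp [hp]
      · by_cases h3 : 3 ≤ (xs.takeWhile (· == x)).length + 1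
        · rw [if_pos ⟨hp, h3⟩, if_neg hp, if_pos (by omega)]
        · rw [if_neg (fun h => h3 h.2), if_neg hp, if_neg (by omega)]

-- ===== VERDICT (by name: the statement is the Claim_ definition above) =====
theorem find_three_py_spec : Claim_equal_find_three_py := by
  intro cards card mb _
  unfold Spec_find_three_py
  exact main_lemma card mb cards.length cards le_rfl
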